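-- pv_equiv track=rewrite | github.com/bijlpieter/advent-of-code-2024 | solutions/day04.py | sliding_window_view
-- ===== SOURCE A (Python) =====
-- from collections.abc import Generator, Sequence
--
-- def shape(grid: Sequence[Sequence]) -> tuple[int, int]:
--     return len(grid), len(grid[0])
--
-- def sliding_window_view(grid: list[str], mask: list[list[bool]]) -> Generator[str]:
--     rows, cols = shape(grid)
--     mrows, mcols = shape(mask)
--     for y in range(rows - mrows + 1):
--         for x in range(cols - mcols + 1):
--             masked = "".join(
--                 grid[y + i][x + j]
--                 for i in range(mrows)
--                 for j in range(mcols)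
--                 if mask[i][j]
--             )
--             yield masked
--             yield masked[::-1]
-- ===== SOURCE B (Python) =====
-- def sliding_window_view(grid, mask):
--     rows, cols = len(grid), len(grid[0])
--     mrows, mcols = len(mask), len(mask[0])
--     wy, wx = max(rows - mrows + 1, 0), max(cols - mcols + 1, 0)
--     nwin = wy * wx
--     # transposed gather: one flat "plane" of characters per selected mask cell,
--     # in window order; window w's string is the w-th character of every plane
--     planes = [] if nwin == 0 else [
--         [grid[y + i][x + j] for y in range(wy) for x in range(wx)]
--         for i, row in enumerate(mask)
--         for j, v in enumerate(row[:mcols])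
--         if v
--     ]
--     for w in range(nwin):
--         masked = "".join(p[w] for p in planes)
--         yield masked
--         yield masked[::-1]
-- ===== Notes on version B (the rewrite author's own statement) =====
-- stated objective: alternative
-- what changed: B transposes the traversal: it gathers, for every selected mask cell, the flat 'plane' of that cell's character over all windows in window order (skipping the gather when there are no windows), and then produces each window's string as the w-th character of every plane, instead of A's window-major loop that rescans every mask cell per window.
import Mathlib
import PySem

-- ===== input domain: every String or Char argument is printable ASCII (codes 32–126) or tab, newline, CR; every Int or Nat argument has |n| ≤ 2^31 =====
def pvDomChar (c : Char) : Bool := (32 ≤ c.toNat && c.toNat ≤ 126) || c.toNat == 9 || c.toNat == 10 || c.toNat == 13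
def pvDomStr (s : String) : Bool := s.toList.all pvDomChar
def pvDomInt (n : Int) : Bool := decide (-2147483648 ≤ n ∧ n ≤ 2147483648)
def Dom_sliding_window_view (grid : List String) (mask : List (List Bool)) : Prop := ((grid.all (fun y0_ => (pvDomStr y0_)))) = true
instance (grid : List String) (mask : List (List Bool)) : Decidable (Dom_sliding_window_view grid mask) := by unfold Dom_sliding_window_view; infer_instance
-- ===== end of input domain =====

-- B transposes the traversal: it gathers one flat per-cell "plane" of characters over all windows,
-- then emits each window's string as the w-th character of every plane; both are generators, the
-- equivalence is about the list of all yielded strings.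

-- ===== PORT A =====
-- literal transliteration of A: shape() lengths, nested window loops, per-window nested
-- mask rescan building `masked` left to right; masked[::-1] is reverse.
def sliding_window_view (grid : List String) (mask : List (List Bool)) : List String :=
  let rows : Int := PySem.List.len grid
  let cols : Int := PySem.Str.len (PySem.List.pyGetD grid 0 "")
  let mrows : Int := PySem.List.len mask
  let mcols : Int := PySem.List.len (PySem.List.pyGetD mask 0 [])
  (PySem.List.pyRange 0 (rows - mrows + 1) 1).foldl (fun acc y =>
    (PySem.List.pyRange 0 (cols - mcols + 1) 1).foldl (fun acc x =>
      let masked : List Char :=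
        (PySem.List.pyRange 0 mrows 1).foldl (fun cs i =>
          (PySem.List.pyRange 0 mcols 1).foldl (fun cs j =>
            if PySem.List.pyGetD (PySem.List.pyGetD mask i []) j false then
              cs ++ [PySem.List.pyGetD (PySem.List.pyGetD grid (y + i) "").toList (x + j) ' ']
            else cs) cs) []
      acc ++ [String.ofList masked, String.ofList masked.reverse]) acc) []

-- ===== PORT B =====
-- literal transliteration of B: one "plane" (window-order list of characters) per selected mask
-- cell (selection via enumerate(mask)/enumerate(row[:mcols])), then window w's string is the
-- w-th character of every plane (skipped when there are no windows); masked[::-1] is reverse.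
def sliding_window_view_alt (grid : List String) (mask : List (List Bool)) : List String :=
  let rows : Int := PySem.List.len grid
  let cols : Int := PySem.Str.len (PySem.List.pyGetD grid 0 "")
  let mrows : Int := PySem.List.len mask
  let mcols : Int := PySem.List.len (PySem.List.pyGetD mask 0 [])
  let wy : Int := max (rows - mrows + 1) 0
  let wx : Int := max (cols - mcols + 1) 0
  let nwin : Int := wy * wx
  let planes : List (List Char) := if nwin == 0 then [] else
    (PySem.List.enumerate mask 0).flatMap (fun p =>
      (PySem.List.enumerate (PySem.List.slice p.2 none (some mcols)) 0).filterMap (fun q =>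
        if q.2 then some
          ((PySem.List.pyRange 0 wy 1).flatMap (fun y =>
            (PySem.List.pyRange 0 wx 1).map (fun x =>
              PySem.List.pyGetD (PySem.List.pyGetD grid (y + p.1) "").toList (x + q.1) ' ')))
        else none))
  (PySem.List.pyRange 0 nwin 1).flatMap (fun w =>
    let masked : List Char := planes.map (fun p => PySem.List.pyGetD p w ' ')
    [String.ofList masked, String.ofList masked.reverse])

-- ===== PRECONDITION & SPEC =====
-- Pre_ = exactly the inputs on which A's generator yields all its values without raising:
-- grid and mask nonempty (shape reads grid[0]/mask[0]), and — whenever at least one window exists —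
-- every mask row reaches width mcols, and every selected cell's grid character is in range in every window.
def Pre_sliding_window_view (grid : List String) (mask : List (List Bool)) : Prop :=
  grid ≠ [] ∧ mask ≠ [] ∧
  ((mask.length ≤ grid.length ∧ (mask.headD []).length ≤ (grid.headD "").toList.length) →
    ∀ i < mask.length, ∀ j < (mask.headD []).length,
      j < (mask.getD i []).length ∧
      ((mask.getD i []).getD j false = true →
        ∀ y ≤ grid.length - mask.length,
          ∀ x ≤ (grid.headD "").toList.length - (mask.headD []).length,
            x + j < (grid.getD (y + i) "").toList.length))
instance (grid : List String) (mask : List (List Bool)) : Decidable (Pre_sliding_window_view grid mask) := by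
  unfold Pre_sliding_window_view; infer_instance
def pvWitness_sliding_window_view : List String × List (List Bool) := (["ab", "cd"], [[true, false]])
def Spec_sliding_window_view (grid : List String) (mask : List (List Bool)) (out : List String) : Prop := out = sliding_window_view_alt grid mask
instance (grid : List String) (mask : List (List Bool)) (out : List String) : Decidable (Spec_sliding_window_view grid mask out) := by unfold Spec_sliding_window_view; infer_instance

-- ===== CLAIM (what is proved, stated in full; the proofs are below) =====
def Claim_equal_sliding_window_view : Prop := ∀ (grid : List String) (mask : List (List Bool)), Dom_sliding_window_view grid mask → Pre_sliding_window_view grid mask → Spec_sliding_window_view grid mask (sliding_window_view grid mask)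

-- ===== LEMMAS AND PROOFS =====

-- the offset table implicit in both B's planes and A's rescan: selected (i, j) in i-outer order
def pvOffsets (mask : List (List Bool)) (t : Int) : List (Int × Int) :=
  (PySem.List.enumerate mask 0).flatMap (fun p =>
    (PySem.List.enumerate (PySem.List.slice p.2 none (some t)) 0).filterMap (fun q =>
      if q.2 then some (p.1, q.1) else none))

-- fusing a map over pvOffsets back into the enumerate/filterMap comprehension
theorem pv_fused {β : Type} (mask : List (List Bool)) (t : Int) (g : Int → Int → β) :
    (PySem.List.enumerate mask 0).flatMap (fun p =>
      (PySem.List.enumerate (PySem.List.slice p.2 none (some t)) 0).filterMap (fun q =>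
        if q.2 then some (g p.1 q.1) else none))
    = (pvOffsets mask t).map (fun o => g o.1 o.2) := by
  unfold pvOffsets
  rw [List.map_flatMap]
  refine congrArg (fun f => List.flatMap f _) (funext fun p => ?_)
  rw [List.map_filterMap]
  apply List.filterMap_congr
  intro q _
  by_cases hq : q.2 <;> simp [hq]

-- filter-then-map as a single filterMap
theorem pv_filter_map_eq_filterMap {α β : Type} (l : List α) (p : α → Bool) (f : α → β) :
    (l.filter p).map f = l.filterMap (fun a => if p a then some (f a) else none) := by
  induction l with
  | nil => rfl
  | cons a t ih => by_cases h : p a <;> simp [h, ih]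

-- selecting over range(min t len) of a truncated row equals selecting over range(t) of the row
theorem pv_rangeTake {β : Type} (row : List Bool) (t : Nat) (h : Nat → β) :
    (List.range (min t row.length)).filterMap
      (fun j => if (row.take t).getD j false then some (h j) else none)
    = (List.range t).filterMap (fun j => if row.getD j false then some (h j) else none) := by
  rcases Nat.lt_or_ge row.length t with hlt | hle
  · rw [min_eq_right hlt.le, List.take_of_length_le hlt.le]
    have ht : t = row.length + (t - row.length) := by omega
    rw [ht, List.range_add, List.filterMap_append]
    have hnil : ((List.range (t - row.length)).map (row.length + ·)).filterMap
        (fun j => if row.getD j false then some (h j) else none) = [] := by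
      rw [List.filterMap_map]
      apply List.filterMap_eq_nil_iff.mpr
      intro j hj
      simp [List.getD_eq_getElem?_getD]
    rw [hnil, List.append_nil]
  · rw [min_eq_left hle]
    apply List.filterMap_congr
    intro j hj
    rw [List.mem_range] at hj
    rw [List.getD_eq_getElem?_getD, List.getD_eq_getElem?_getD, List.getElem?_take]
    simp [hj]

-- B's per-row enumerate over row[:mcols] equals A's index scan over range(mcols)
theorem pv_innerRow {β : Type} (row : List Bool) (t : Nat) (h : Int → β) :
    (PySem.List.enumerate (PySem.List.slice row none (some (t : Int))) 0).filterMap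
      (fun q => if q.2 then some (h q.1) else none)
    = (List.range t).filterMap
      (fun j => if row.getD j false then some (h (j : Int)) else none) := by
  rw [PySem.List.slice_to row (by positivity), Int.toNat_natCast,
      PySem.List.enumerate_eq_map_pyRange _ false, List.filterMap_map]
  have hlen : PySem.List.len (row.take t) = ((min t row.length : Nat) : Int) := by
    simp [PySem.List.len_eq]
  rw [hlen, PySem.List.pyRange_zero_nat, List.filterMap_map]
  have step : List.filterMap
        (((fun q : Int × Bool => if q.2 then some (h q.1) else none) ∘ fun j =>
            (j, PySem.List.pyGetD (List.take t row) j false)) ∘ fun k : Nat => (k : Int))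
        (List.range (min t row.length))
      = List.filterMap (fun j : Nat => if (row.take t).getD j false then some (h (j : Int)) else none)
        (List.range (min t row.length)) :=
    congrArg (fun f => List.filterMap f _) (funext fun j => by simp [Function.comp])
  rw [step]
  exact pv_rangeTake row t (fun j => h (j : Int))

-- the offsets table, mapped over, produces exactly A's nested mask rescan, for any per-cell function g
theorem pv_offsets_eq {β : Type} (mask : List (List Bool)) (t : Nat) (g : Int → Int → β) :
    (pvOffsets mask (t : Int)).map (fun o => g o.1 o.2)
    = (PySem.List.pyRange 0 (PySem.List.len mask) 1).flatMap (fun i =>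
        ((PySem.List.pyRange 0 (t : Int) 1).filter
          (fun j => PySem.List.pyGetD (PySem.List.pyGetD mask i []) j false)).map (g i)) := by
  rw [← pv_fused]
  rw [PySem.List.enumerate_eq_map_pyRange _ ([] : List Bool), List.flatMap_map]
  refine congrArg (fun f => List.flatMap f _) (funext fun i => ?_)
  rw [pv_filter_map_eq_filterMap, PySem.List.pyRange_zero_nat, List.filterMap_map,
      pv_innerRow (PySem.List.pyGetD mask i []) t (g i)]
  apply List.filterMap_congr
  intro j _
  simp [Function.comp]

-- splitting range(a*b) into the double loop over range(a) × range(b)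
theorem pv_range_mul_flatMap {α : Type} (a b : Nat) (f : Nat → List α) :
    (List.range (a * b)).flatMap f
    = (List.range a).flatMap (fun y => (List.range b).flatMap (fun x => f (y * b + x))) := by
  induction a with
  | zero => simp
  | succ a ih =>
    rw [Nat.succ_mul, List.range_add, List.flatMap_append, ih, List.range_succ,
        List.flatMap_append, List.flatMap_map]
    simp

-- a plane, indexed at window y*b+x, returns that window's character
theorem pv_plane_eq_map {α : Type} (a b : Nat) (g : Nat → Nat → α) :
    (List.range a).flatMap (fun y => (List.range b).map (g y))
    = (List.range (a * b)).map (fun w => g (w / b) (w % b)) := by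
  rw [← List.flatMap_pure_eq_map, pv_range_mul_flatMap]
  refine List.flatMap_congr (fun y _ => ?_)
  rw [← List.flatMap_pure_eq_map]
  refine List.flatMap_congr (fun x hx => ?_)
  rw [List.mem_range] at hx
  have hb : 0 < b := by omega
  have hdiv : (y * b + x) / b = y := by
    rw [Nat.mul_comm y b, Nat.mul_add_div hb, Nat.div_eq_of_lt hx, Nat.add_zero]
  have hmod : (y * b + x) % b = x := by
    rw [Nat.mul_comm y b, Nat.mul_add_mod, Nat.mod_eq_of_lt hx]
  simp [hdiv, hmod]

theorem pv_plane_getD {α : Type} (a b y0 x0 : Nat) (d : α) (hy : y0 < a) (hx : x0 < b)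
    (g : Nat → Nat → α) :
    ((List.range a).flatMap (fun y => (List.range b).map (g y))).getD (y0 * b + x0) d = g y0 x0 := by
  have hlt : y0 * b + x0 < a * b := by
    have h1 : y0 * b + x0 < (y0 + 1) * b := by rw [Nat.succ_mul]; omega
    exact Nat.lt_of_lt_of_le h1 (Nat.mul_le_mul_right b hy)
  rw [pv_plane_eq_map, PySem.List.getD_map_range _ _ _ _ hlt]
  have hb : 0 < b := by omega
  have hdiv : (y0 * b + x0) / b = y0 := by
    rw [Nat.mul_comm y0 b, Nat.mul_add_div hb, Nat.div_eq_of_lt hx, Nat.add_zero]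
  have hmod : (y0 * b + x0) % b = x0 := by
    rw [Nat.mul_comm y0 b, Nat.mul_add_mod, Nat.mod_eq_of_lt hx]
  rw [hdiv, hmod]

-- a pyRange over a possibly-negative bound equals the range over its clamp to 0
theorem pv_pyRange_max (n : Int) :
    PySem.List.pyRange 0 n 1 = PySem.List.pyRange 0 (max n 0) 1 := by
  by_cases h : 0 ≤ n
  · rw [max_eq_left h]
  · rw [PySem.List.pyRange_one_eq_nil (by omega), PySem.List.pyRange_one_eq_nil (by omega)]

-- A's per-window nested mask rescan equals a map over the offset table
theorem pv_maskedA (grid : List String) (mask : List (List Bool)) (t : Nat) (y x : Int) :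
    (PySem.List.pyRange 0 (PySem.List.len mask) 1).flatMap (fun i =>
      ((PySem.List.pyRange 0 (t : Int) 1).filter
        (fun j => PySem.List.pyGetD (PySem.List.pyGetD mask i []) j false)).map
        (fun j => PySem.List.pyGetD (PySem.List.pyGetD grid (y + i) "").toList (x + j) ' '))
    = (pvOffsets mask (t : Int)).map
        (fun o => PySem.List.pyGetD (PySem.List.pyGetD grid (y + o.1) "").toList (x + o.2) ' ') :=
  (pv_offsets_eq mask t
    (fun i j => PySem.List.pyGetD (PySem.List.pyGetD grid (y + i) "").toList (x + j) ' ')).symm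

-- B's planes comprehension equals a map of the plane builder over the offset table
theorem pv_planesB (grid : List String) (mask : List (List Bool)) (t : Nat) (wy wx : Int) :
    ((PySem.List.enumerate mask 0).flatMap (fun p =>
      (PySem.List.enumerate (PySem.List.slice p.2 none (some (t : Int))) 0).filterMap (fun q =>
        if q.2 then some
          ((PySem.List.pyRange 0 wy 1).flatMap (fun y =>
            (PySem.List.pyRange 0 wx 1).map (fun x =>
              PySem.List.pyGetD (PySem.List.pyGetD grid (y + p.1) "").toList (x + q.1) ' ')))
        else none)))
    = (pvOffsets mask (t : Int)).map (fun o =>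
        (PySem.List.pyRange 0 wy 1).flatMap (fun y =>
          (PySem.List.pyRange 0 wx 1).map (fun x =>
            PySem.List.pyGetD (PySem.List.pyGetD grid (y + o.1) "").toList (x + o.2) ' '))) :=
  pv_fused mask (t : Int) (fun i j =>
    (PySem.List.pyRange 0 wy 1).flatMap (fun y =>
      (PySem.List.pyRange 0 wx 1).map (fun x =>
        PySem.List.pyGetD (PySem.List.pyGetD grid (y + i) "").toList (x + j) ' ')))

-- ===== VERDICT (by name: the statement is the Claim_ definition above) =====
theorem sliding_window_view_spec : Claim_equal_sliding_window_view := by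
  intro grid mask _ _
  unfold Spec_sliding_window_view sliding_window_view sliding_window_view_alt
  simp only [PySem.List.foldl_append_if, PySem.List.foldl_append_eq_flatMap, List.nil_append]
  have ht : PySem.List.len (PySem.List.pyGetD mask 0 []) =
      (((PySem.List.pyGetD mask 0 []).length : Nat) : Int) := by simp [PySem.List.len_eq]
  rw [ht]
  rw [pv_pyRange_max (PySem.List.len grid - PySem.List.len mask + 1),
      pv_pyRange_max (PySem.Str.len (PySem.List.pyGetD grid 0 "") -
        (((PySem.List.pyGetD mask 0 []).length : Nat) : Int) + 1)]
  have ha : max (PySem.List.len grid - PySem.List.len mask + 1) 0 =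
      (((max (PySem.List.len grid - PySem.List.len mask + 1) 0).toNat : Nat) : Int) := by omega
  have hb : max (PySem.Str.len (PySem.List.pyGetD grid 0 "") -
        (((PySem.List.pyGetD mask 0 []).length : Nat) : Int) + 1) 0 =
      (((max (PySem.Str.len (PySem.List.pyGetD grid 0 "") -
        (((PySem.List.pyGetD mask 0 []).length : Nat) : Int) + 1) 0).toNat : Nat) : Int) := by omega
  rw [ha, hb, ← Nat.cast_mul]
  generalize (max (PySem.List.len grid - PySem.List.len mask + 1) 0).toNat = a
  generalize (max (PySem.Str.len (PySem.List.pyGetD grid 0 "") -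
        (((PySem.List.pyGetD mask 0 []).length : Nat) : Int) + 1) 0).toNat = b
  by_cases h0 : a * b = 0
  · have hr : PySem.List.pyRange 0 ((a * b : Nat) : Int) 1 = [] := by
      rw [h0]; exact PySem.List.pyRange_one_eq_nil (by omega)
    rw [hr, List.flatMap_nil]
    rcases Nat.mul_eq_zero.mp h0 with ha0 | hb0
    · rw [ha0]
      rw [show PySem.List.pyRange 0 (((0 : Nat) : Nat) : Int) 1 = [] from
            PySem.List.pyRange_one_eq_nil (by simp), List.flatMap_nil]
    · rw [hb0]
      rw [show PySem.List.pyRange 0 (((0 : Nat) : Nat) : Int) 1 = [] from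
            PySem.List.pyRange_one_eq_nil (by simp)]
      simp
  have hif : (((a * b : Nat) : Int) == 0) = false := by
    simp only [beq_eq_false_iff_ne, ne_eq, Nat.cast_eq_zero]
    exact h0
  rw [hif]
  simp only [Bool.false_eq_true, if_false]
  simp only [pv_maskedA, pv_planesB]
  rw [PySem.List.pyRange_zero_nat a, PySem.List.pyRange_zero_nat (a * b), List.flatMap_map,
      List.flatMap_map, pv_range_mul_flatMap]
  refine List.flatMap_congr (fun y hy => ?_)
  rw [PySem.List.pyRange_zero_nat b, List.flatMap_map]
  refine List.flatMap_congr (fun x hx => ?_)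
  rw [List.mem_range] at hy hx
  have hplane : ∀ o : Int × Int,
      PySem.List.pyGetD
        (List.flatMap (fun y' : Int =>
            List.map (fun x' : Nat =>
              PySem.List.pyGetD (PySem.List.pyGetD grid (y' + o.1) "").toList ((x' : Int) + o.2) ' ')
              (List.range b))
          (List.map (fun k : Nat => (k : Int)) (List.range a)))
        (((y * b + x : Nat) : Int)) ' '
      = PySem.List.pyGetD (PySem.List.pyGetD grid ((y : Nat) + o.1) "").toList ((x : Nat) + o.2) ' ' := by
    intro o
    rw [List.flatMap_map, PySem.List.pyGetD_natCast]
    exact pv_plane_getD a b y x ' ' hy hx _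
  simp only [Function.comp_def, List.map_map]
  simp only [hplane]
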